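-- pv_equiv track=rewrite | github.com/wekt0r/uni | Sztuczna Inteligencja/p2/z1.py | block_values
-- ===== SOURCE A (Python) =====
-- def block_values(line):
--     result = []
--     counter = 0
--     for i in line:
--         if i:
--             counter += 1
--         else:
--             if counter:
--                 result.append(counter)
--                 counter = 0
--     return result + [counter] if counter != 0 else result
-- ===== SOURCE B (Python) =====
-- def block_values(line):
--     res = []
--     rest = line
--     while rest:
--         key = bool(rest[0])
--         n = 1
--         while n < len(rest) and bool(rest[n]) == key:
--             n += 1
--         if key:
--             res.append(n)
--         rest = rest[n:]
--     return res
-- ===== Notes on version B (the rewrite author's own statement) =====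
-- stated objective: alternative
-- what changed: Instead of a running counter flushed on each falsy element (plus a trailing flush), B partitions the list into maximal runs of equal truthiness groupby-style and emits the length of each truthy run.
import Mathlib
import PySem

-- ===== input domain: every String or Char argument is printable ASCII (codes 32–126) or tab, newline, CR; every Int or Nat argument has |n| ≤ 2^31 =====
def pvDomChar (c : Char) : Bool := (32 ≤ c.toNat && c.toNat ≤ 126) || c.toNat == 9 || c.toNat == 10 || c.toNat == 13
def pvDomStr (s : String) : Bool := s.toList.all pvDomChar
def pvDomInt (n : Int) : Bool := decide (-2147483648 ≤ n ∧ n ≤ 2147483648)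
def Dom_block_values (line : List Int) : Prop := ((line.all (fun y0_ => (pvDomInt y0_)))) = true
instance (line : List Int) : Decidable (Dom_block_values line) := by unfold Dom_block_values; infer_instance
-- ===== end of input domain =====

-- B replaces A's running counter with a groupby-style scan over maximal runs; same return value on all inputs (A is total).

-- ===== PORT A =====
-- one loop iteration of A: truthy increments the counter, falsy flushes a nonzero counter
def bvStep (s : List Int × Int) (i : Int) : List Int × Int :=
  if i ≠ 0 then (s.1, s.2 + 1)
  else if s.2 ≠ 0 then (s.1 ++ [s.2], 0) else s

def block_values (line : List Int) : List Int :=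
  let p := line.foldl bvStep ([], 0)
  if p.2 ≠ 0 then p.1 ++ [p.2] else p.1

-- ===== PORT B =====
-- inner while loop of Source B: length of the maximal leading run whose truthiness equals key, plus the rest
def bvRun (key : Bool) : List Int → Nat × List Int
  | [] => (0, [])
  | y :: ys =>
    if decide (y ≠ 0) = key then
      let p := bvRun key ys
      (p.1 + 1, p.2)
    else (0, y :: ys)

theorem bvRun_len (key : Bool) : ∀ l : List Int, (bvRun key l).2.length ≤ l.length := by
  intro l
  induction l with
  | nil => simp [bvRun]
  | cons y ys ih =>
    unfold bvRun
    split
    · exact Nat.le_succ_of_le ih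
    · simp

-- outer while loop of Source B: emit the length of each truthy maximal run
def block_values_alt : List Int → List Int
  | [] => []
  | x :: xs =>
    let p := bvRun (decide (x ≠ 0)) xs
    if x ≠ 0 then ((p.1 : Int) + 1) :: block_values_alt p.2
    else block_values_alt p.2
termination_by l => l.length
decreasing_by
  all_goals exact Nat.lt_succ_of_le (bvRun_len _ xs)

-- ===== PRECONDITION & SPEC =====
def Spec_block_values (line : List Int) (out : List Int) : Prop := out = block_values_alt line
instance (line : List Int) (out : List Int) : Decidable (Spec_block_values line out) := by unfold Spec_block_values; infer_instance

-- ===== CLAIM (what is proved, stated in full; the proofs are below) =====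
def Claim_equal_block_values : Prop := ∀ (line : List Int), Dom_block_values line → Spec_block_values line (block_values line)

-- ===== LEMMAS AND PROOFS =====

-- finishing step of A: append a nonzero trailing counter
def bvFin (p : List Int × Int) : List Int := if p.2 ≠ 0 then p.1 ++ [p.2] else p.1

theorem bvFin_append (res : List Int) (p : List Int × Int) :
    bvFin (res ++ p.1, p.2) = res ++ bvFin p := by
  unfold bvFin; split <;> simp

theorem foldl_shift : ∀ (l : List Int) (res : List Int) (c : Int),
    l.foldl bvStep (res, c) =
      (res ++ (l.foldl bvStep ([], c)).1, (l.foldl bvStep ([], c)).2) := by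
  intro l
  induction l with
  | nil => simp
  | cons x xs ih =>
    intro res c
    simp only [List.foldl_cons]
    by_cases hx : x ≠ 0
    · have e1 : bvStep (res, c) x = (res, c + 1) := by simp [bvStep, hx]
      have e2 : bvStep (([] : List Int), c) x = ([], c + 1) := by simp [bvStep, hx]
      rw [e1, e2, ih res (c + 1), ih [] (c + 1)]
    · by_cases hc : c ≠ 0
      · have e1 : bvStep (res, c) x = (res ++ [c], 0) := by simp [bvStep, hx, hc]
        have e2 : bvStep (([] : List Int), c) x = ([c], 0) := by simp [bvStep, hx, hc]
        rw [e1, e2, ih (res ++ [c]) 0, ih [c] 0]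
        simp
      · have e1 : bvStep (res, c) x = (res, c) := by simp [bvStep, hx, hc]
        have e2 : bvStep (([] : List Int), c) x = ([], c) := by simp [bvStep, hx, hc]
        rw [e1, e2]
        exact ih res c

-- block_values_alt ignores a maximal leading falsy run
theorem alt_skip_false (xs : List Int) :
    block_values_alt (bvRun false xs).2 = block_values_alt xs := by
  cases xs with
  | nil => simp [bvRun]
  | cons y ys =>
    by_cases hy : y ≠ 0
    · simp [bvRun, hy]
    · simp only [ne_eq, not_not] at hy
      subst hy
      simp [bvRun, block_values_alt]

theorem bv_main : ∀ (l : List Int),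
    (∀ c : Int, 0 < c →
      bvFin (l.foldl bvStep ([], c)) =
        (c + ((bvRun true l).1 : Int)) :: block_values_alt (bvRun true l).2)
    ∧ bvFin (l.foldl bvStep ([], 0)) = block_values_alt l := by
  intro l
  induction l with
  | nil =>
    refine ⟨fun c hc => ?_, by simp [bvFin, block_values_alt]⟩
    simp [bvFin, bvRun, block_values_alt, show c ≠ 0 by omega]
  | cons x xs ih =>
    by_cases hx : x ≠ 0
    · have hd : decide (x ≠ 0) = true := decide_eq_true hx
      have hstep : ∀ c : Int, bvStep ([], c) x = ([], c + 1) := fun c => by simp [bvStep, hx]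
      have hr : bvRun true (x :: xs) = ((bvRun true xs).1 + 1, (bvRun true xs).2) := by
        conv_lhs => rw [bvRun]
        rw [hd, if_pos rfl]
      have ha : block_values_alt (x :: xs)
          = (((bvRun true xs).1 : Int) + 1) :: block_values_alt (bvRun true xs).2 := by
        rw [block_values_alt, hd, if_pos hx]
      refine ⟨fun c hc => ?_, ?_⟩
      · rw [List.foldl_cons, hstep, ih.1 (c + 1) (by omega), hr]
        congr 1
        push_cast
        ring
      · rw [List.foldl_cons, hstep, show (0 : Int) + 1 = 1 from rfl,
            ih.1 1 (by omega), ha]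
        congr 1
        omega
    · simp only [ne_eq, not_not] at hx
      subst hx
      have hskip : block_values_alt (0 :: xs) = block_values_alt xs := by
        have h0 : block_values_alt (0 :: xs) = block_values_alt (bvRun false xs).2 := by
          simp [block_values_alt]
        rw [h0, alt_skip_false]
      refine ⟨fun c hc => ?_, ?_⟩
      · have hcne : c ≠ 0 := by omega
        have hstep : bvStep ([], c) (0 : Int) = ([c], 0) := by simp [bvStep, hcne]
        have h1 : bvRun true ((0 : Int) :: xs) = (0, 0 :: xs) := by
          unfold bvRun
          simp
        rw [List.foldl_cons, hstep, foldl_shift xs [c] 0, bvFin_append, ih.2, h1, hskip]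
        simp
      · have hstep : bvStep (([] : List Int), (0 : Int)) (0 : Int) = ([], 0) := by
          simp [bvStep]
        rw [List.foldl_cons, hstep, ih.2, hskip]

-- ===== VERDICT (by name: the statement is the Claim_ definition above) =====
theorem block_values_spec : Claim_equal_block_values := by
  intro line _
  show block_values line = block_values_alt line
  have h := (bv_main line).2
  simpa [block_values, bvFin] using h
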